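-- pv_equiv track=rewrite | github.com/AileenXie/leetcode | written-examination/0906meituan/03.py | func
-- ===== SOURCE A (Python) =====
-- import collections
--
-- def func(n,a):
--     if not n: return "YES"
--     if n==1 and a[0]==1: return "YES"
--     for i in a:
--         if i==2: return "NO"
--     # return "YES"
--     count = collections.Counter(a)
--     if 3 in count.keys():
--         k = count[3]
--         while k>0:
--             count[1]-=2
--             if count[1]<0: return "NO"
--             k-=1
--
--     if 4 in count.keys():
--         k=count[4]
--         while k>0:
--             count[1]-=3
--             if count[1]<0: return "NO"
--             k-=1
--     if 5 in count.keys():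
--         if (3 not in count or count[3]<=0) and count[1]<4: return "NO"
--
--     return "YES"
-- ===== SOURCE B (Python) =====
-- def func(n, a):
--     if not n:
--         return "YES"
--     if n == 1 and a[0] == 1:
--         return "YES"
--     c1 = c3 = c4 = 0
--     has2 = has5 = False
--     for x in a:
--         if x == 1:
--             c1 += 1
--         elif x == 2:
--             has2 = True
--         elif x == 3:
--             c3 += 1
--         elif x == 4:
--             c4 += 1
--         elif x == 5:
--             has5 = True
--     if has2:
--         return "NO"
--     remaining = c1 - 2 * c3 - 3 * c4
--     if remaining < 0:
--         return "NO"
--     if has5 and c3 == 0 and remaining < 4: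
--         return "NO"
--     return "YES"
-- ===== Notes on version B (the rewrite author's own statement) =====
-- stated objective: simpler
-- what changed: One single-pass tally plus a closed-form check (remaining = c1 - 2*c3 - 3*c4) replaces A's early-return scan, Counter construction and the two while-loops of repeated decrements.
-- outside the precondition, e.g. on func(1, []): A raises IndexError, B raises IndexError
import Mathlib
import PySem

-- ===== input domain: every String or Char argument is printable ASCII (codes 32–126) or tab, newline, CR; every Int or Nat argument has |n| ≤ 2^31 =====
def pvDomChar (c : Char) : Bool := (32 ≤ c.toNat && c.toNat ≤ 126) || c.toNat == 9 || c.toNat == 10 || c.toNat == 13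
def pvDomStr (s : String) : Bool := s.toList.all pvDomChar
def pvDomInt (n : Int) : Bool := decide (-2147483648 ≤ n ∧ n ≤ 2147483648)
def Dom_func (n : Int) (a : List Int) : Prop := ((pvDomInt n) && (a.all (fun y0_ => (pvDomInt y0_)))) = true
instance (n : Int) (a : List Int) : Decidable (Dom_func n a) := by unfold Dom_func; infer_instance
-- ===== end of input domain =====

-- B replaces A's Counter plus two decrement while-loops by one single-pass tally and a
-- closed-form remaining-ones check; objective: simpler, same cost.


-- ===== PORT A =====
-- 'for i in a: if i==2: return "NO"'
def funcScan2 : List Int → Bool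
  | [] => false
  | i :: rest => if i == 2 then true else funcScan2 rest

-- 'k = count[x]; while k>0: count[1] -= step; if count[1] < 0: return "NO"; k -= 1'
-- (none = the early return "NO"); recursion on k mirrors the while loop step for step
def funcWhile (step : Int) (k : Int) (count : PySem.Dict Int Int) :
    Option (PySem.Dict Int Int) :=
  if h : k > 0 then
    let count' := count.modify 1 0 (· - step)
    if count'.getD 1 0 < 0 then none else funcWhile step (k - 1) count'
  else some count
termination_by k.toNat
decreasing_by omega

def func (n : Int) (a : List Int) : String :=
  if n == 0 then "YES"
  else if n == 1 && PySem.List.pyGet? a 0 == some 1 then "YES"   -- a[0]: IndexError (none) excluded by Pre_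
  else if funcScan2 a then "NO"
  else
    let count := PySem.Dict.counter a
    let r1 := if count.contains 3 then funcWhile 2 (count.getD 3 0) count else some count
    match r1 with
    | none => "NO"
    | some count1 =>
      let r2 := if count1.contains 4 then funcWhile 3 (count1.getD 4 0) count1 else some count1
      match r2 with
      | none => "NO"
      | some count2 =>
        if count2.contains 5 then
          if (!count2.contains 3 || count2.getD 3 0 ≤ 0) && count2.getD 1 0 < 4 then "NO"
          else "YES"
        else "YES"

-- ===== PORT B =====
def funcTally (s : Int × Bool × Int × Int × Bool) (x : Int) : Int × Bool × Int × Int × Bool :=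
  let (c1, has2, c3, c4, has5) := s
  if x == 1 then (c1 + 1, has2, c3, c4, has5)
  else if x == 2 then (c1, true, c3, c4, has5)
  else if x == 3 then (c1, has2, c3 + 1, c4, has5)
  else if x == 4 then (c1, has2, c3, c4 + 1, has5)
  else if x == 5 then (c1, has2, c3, c4, true)
  else s

def func_alt (n : Int) (a : List Int) : String :=
  if n == 0 then "YES"
  else if n == 1 && PySem.List.pyGet? a 0 == some 1 then "YES"
  else
    let (c1, has2, c3, c4, has5) := a.foldl funcTally (0, false, 0, 0, false)
    if has2 then "NO"
    else
      let remaining := c1 - 2 * c3 - 3 * c4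
      if remaining < 0 then "NO"
      else if has5 && c3 == 0 && remaining < 4 then "NO"
      else "YES"

-- ===== PRECONDITION & SPEC =====
-- Pre_ excludes only n = 1 with empty a, where A (and B alike) raise IndexError on a[0].
def Pre_func (n : Int) (a : List Int) : Prop := n = 1 → a ≠ []
instance (n : Int) (a : List Int) : Decidable (Pre_func n a) := by unfold Pre_func; infer_instance
def pvWitness_func : Int × List Int := (3, [1, 1, 3])

def Spec_func (n : Int) (a : List Int) (out : String) : Prop := out = func_alt n a
instance (n : Int) (a : List Int) (out : String) : Decidable (Spec_func n a out) := by unfold Spec_func; infer_instance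

-- ===== CLAIM (what is proved, stated in full; the proofs are below) =====
def Claim_equal_func : Prop := ∀ (n : Int) (a : List Int), Dom_func n a → Pre_func n a → Spec_func n a (func n a)

-- ===== LEMMAS AND PROOFS =====

theorem funcScan2_eq (a : List Int) : funcScan2 a = a.contains 2 := by
  induction a with
  | nil => rfl
  | cons x t ih =>
    by_cases h : x = 2
    · subst h; simp [funcScan2]
    · rw [funcScan2]
      simp [show (x == 2) = false by simp [h], ih]
      exact fun he => absurd he.symm h

-- behaviour of the while loop: none iff the ones run out; otherwise only key 1 changed
theorem funcWhile_spec (step : Int) (hstep : 0 < step) (m : Nat) :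
    ∀ (d : PySem.Dict Int Int),
    (funcWhile step (m : Int) d = none ↔ d.getD 1 0 - step * m < 0 ∧ 0 < m) ∧
    (∀ d', funcWhile step (m : Int) d = some d' →
       d'.getD 1 0 = d.getD 1 0 - step * m ∧
       ∀ v : Int, v ≠ 1 → d'.getD v 0 = d.getD v 0 ∧ d'.contains v = d.contains v) := by
  induction m with
  | zero =>
    intro d
    rw [funcWhile]
    simp
  | succ m ih =>
    intro d
    have hpos : ((m : Int) + 1) > 0 := by positivity
    rw [show ((m + 1 : Nat) : Int) = (m : Int) + 1 by push_cast; ring, funcWhile]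
    simp only [hpos, dif_pos]
    have hm1 : (m : Int) + 1 - 1 = (m : Int) := by ring
    rw [hm1]
    set d0 := d.modify 1 0 (· - step) with hd0
    have h1 : d0.getD 1 0 = d.getD 1 0 - step := PySem.Dict.getD_modify_self ..
    have hmnn : (0:Int) ≤ step * m := by positivity
    by_cases hneg : d0.getD 1 0 < 0
    · have : d.getD 1 0 - step * ((m:Int)+1) < 0 := by rw [h1] at hneg; nlinarith
      simp [hneg, this]
    · simp only [hneg, if_neg, if_false]
      obtain ⟨ihnone, ihsome⟩ := ih d0
      constructor
      · rw [ihnone, h1]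
        rw [h1] at hneg
        constructor
        · rintro ⟨h, _⟩
          exact ⟨by nlinarith, by positivity⟩
        · rintro ⟨h, _⟩
          have hm : 0 < m := by
            by_contra hm0
            have : m = 0 := by omega
            subst this
            simp at h
            omega
          exact ⟨by nlinarith, hm⟩
      · intro d' hd'
        obtain ⟨hg, hrest⟩ := ihsome d' hd'
        refine ⟨by rw [hg, h1]; ring, ?_⟩
        intro v hv
        obtain ⟨ha, hb⟩ := hrest v hv
        have hgv : d0.getD v 0 = d.getD v 0 := by
          rw [hd0, PySem.Dict.getD_modify]
          simp [hv]
        have hcv : d0.contains v = d.contains v := by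
          rw [hd0, PySem.Dict.contains_modify]
          simp [hv]
        exact ⟨ha.trans hgv, hb.trans hcv⟩

theorem funcTally_foldl (a : List Int) :
    ∀ s : Int × Bool × Int × Int × Bool,
    a.foldl funcTally s =
      (s.1 + a.count 1, s.2.1 || a.contains 2, s.2.2.1 + a.count 3,
       s.2.2.2.1 + a.count 4, s.2.2.2.2 || a.contains 5) := by
  induction a with
  | nil => intro s; simp
  | cons x t ih =>
    intro s
    obtain ⟨c1, h2, c3, c4, h5⟩ := s
    rw [List.foldl_cons, ih]
    simp only [funcTally, beq_iff_eq]
    split_ifs with e1 e2 e3 e4 e5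
    · subst e1; simp [List.count_cons, List.contains_cons, Prod.mk.injEq]
      push_cast; try omega
    · subst e2; simp [List.count_cons, List.contains_cons, Prod.mk.injEq]
    · subst e3; simp [List.count_cons, List.contains_cons, Prod.mk.injEq]
      push_cast; try omega
    · subst e4; simp [List.count_cons, List.contains_cons, Prod.mk.injEq]
      push_cast; try omega
    · subst e5; simp [List.count_cons, List.contains_cons, Prod.mk.injEq]
    · simp [List.count_cons, List.contains_cons, Prod.mk.injEq, e1, e3, e4,
        Ne.symm e1, Ne.symm e2, Ne.symm e3, Ne.symm e4, Ne.symm e5]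

-- ===== VERDICT =====
theorem func_spec : Claim_equal_func := by
  intro n a _ hpre
  unfold Spec_func func func_alt
  by_cases hn0 : n == 0
  · simp [hn0]
  · simp only [hn0, if_false, Bool.false_eq_true]
    by_cases hg : n == 1 && PySem.List.pyGet? a 0 == some 1
    · simp [hg]
    · simp only [hg, if_false, Bool.false_eq_true]
      rw [funcTally_foldl a (0, false, 0, 0, false)]
      simp only
      rw [funcScan2_eq]
      by_cases h2 : (2:Int) ∈ a
      · simp [h2]
      · simp only [List.contains_eq_mem, h2, decide_false, if_false, Bool.false_eq_true]
        have hc1 : (PySem.Dict.counter a).getD 1 0 = ((a.count 1 : Nat) : Int) :=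
          PySem.Dict.getD_counter ..
        have hc3 : (PySem.Dict.counter a).getD 3 0 = ((a.count 3 : Nat) : Int) :=
          PySem.Dict.getD_counter ..
        have hct3 : (PySem.Dict.counter a).contains 3 = a.contains 3 :=
          PySem.Dict.contains_counter ..
        have hct5 : (PySem.Dict.counter a).contains 5 = a.contains 5 :=
          PySem.Dict.contains_counter ..
        have spec3 := funcWhile_spec 2 (by norm_num) (a.count 3) (PySem.Dict.counter a)
        -- the guarded first loop is funcWhile with k = count[3] in either case (k = 0 is a no-op)
        have hif3 : (if (PySem.Dict.counter a).contains 3 = true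
            then funcWhile 2 ((PySem.Dict.counter a).getD 3 0) (PySem.Dict.counter a)
            else some (PySem.Dict.counter a)) =
            funcWhile 2 ((a.count 3 : Nat) : Int) (PySem.Dict.counter a) := by
          by_cases h3 : (3:Int) ∈ a
          · rw [if_pos (by simp [hct3, h3]), hc3]
          · rw [if_neg (by simp [hct3, h3]), List.count_eq_zero.mpr h3]
            rw [funcWhile]
            norm_num
        rw [hif3]
        rcases hr1 : funcWhile 2 ((a.count 3 : Nat) : Int) (PySem.Dict.counter a) with _ | d1
        · -- the loop over the 3s ran out of 1s: both sides "NO"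
          have hcnd := (spec3.1).mp hr1
          rw [hc1] at hcnd
          have hrem : ((a.count 1 : Nat) : Int) - 2 * a.count 3 - 3 * a.count 4 < 0 := by
            have h4 : (0:Int) ≤ ((a.count 4 : Nat) : Int) := by positivity
            omega
          simp [hrem]
        · obtain ⟨hd1g, hd1rest⟩ := spec3.2 d1 hr1
          have hd1c4 : d1.getD 4 0 = ((a.count 4 : Nat) : Int) := by
            rw [(hd1rest 4 (by norm_num)).1, PySem.Dict.getD_counter]
          have hd1ct4 : d1.contains 4 = a.contains 4 := by
            rw [(hd1rest 4 (by norm_num)).2, PySem.Dict.contains_counter]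
          have hd1g' : d1.getD 1 0 = ((a.count 1 : Nat) : Int) - 2 * a.count 3 := by
            rw [hd1g, hc1]
          have spec4 := funcWhile_spec 3 (by norm_num) (a.count 4) d1
          have hif4 : (if d1.contains 4 = true then funcWhile 3 (d1.getD 4 0) d1 else some d1)
              = funcWhile 3 ((a.count 4 : Nat) : Int) d1 := by
            by_cases h4 : (4:Int) ∈ a
            · rw [if_pos (by simp [hd1ct4, h4]), hd1c4]
            · rw [if_neg (by simp [hd1ct4, h4]), List.count_eq_zero.mpr h4]
              rw [funcWhile]
              norm_num
          rcases hr2 : funcWhile 3 ((a.count 4 : Nat) : Int) d1 with _ | d2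
          · -- the loop over the 4s ran out of 1s: both sides "NO"
            have hcnd := (spec4.1).mp hr2
            rw [hd1g'] at hcnd
            have hrem : ((a.count 1 : Nat) : Int) - 2 * a.count 3 - 3 * a.count 4 < 0 := by
              omega
            simp [hif4, hr2, hrem]
          · obtain ⟨hd2g, hd2rest⟩ := spec4.2 d2 hr2
            have hd2g' : d2.getD 1 0 =
                ((a.count 1 : Nat) : Int) - 2 * a.count 3 - 3 * a.count 4 := by
              rw [hd2g, hd1g']
            have hd2c3 : d2.getD 3 0 = ((a.count 3 : Nat) : Int) := by
              rw [(hd2rest 3 (by norm_num)).1, (hd1rest 3 (by norm_num)).1,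
                PySem.Dict.getD_counter]
            have hd2ct3 : d2.contains 3 = a.contains 3 := by
              rw [(hd2rest 3 (by norm_num)).2, (hd1rest 3 (by norm_num)).2,
                PySem.Dict.contains_counter]
            have hd2ct5 : d2.contains 5 = a.contains 5 := by
              rw [(hd2rest 5 (by norm_num)).2, (hd1rest 5 (by norm_num)).2,
                PySem.Dict.contains_counter]
            have hnotrem :
                ¬ (((a.count 1 : Nat) : Int) - 2 * a.count 3 - 3 * a.count 4 < 0) := by
              intro hcon
              by_cases h4 : 0 < a.count 4
              · have hn : funcWhile 3 ((a.count 4 : Nat) : Int) d1 = none :=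
                  (spec4.1).mpr (by rw [hd1g']; exact ⟨by omega, h4⟩)
                rw [hn] at hr2
                simp at hr2
              · have h40 : a.count 4 = 0 := by omega
                rw [h40] at hcon
                push_cast at hcon
                by_cases h3 : 0 < a.count 3
                · have hn : funcWhile 2 ((a.count 3 : Nat) : Int) (PySem.Dict.counter a)
                      = none :=
                    (spec3.1).mpr (by rw [hc1]; exact ⟨by omega, h3⟩)
                  rw [hn] at hr1
                  simp at hr1
                · have h30 : a.count 3 = 0 := by omega
                  rw [h30] at hcon
                  push_cast at hcon
                  have : (0:Int) ≤ ((a.count 1 : Nat) : Int) := by positivity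
                  omega
            by_cases h5 : (5:Int) ∈ a
            · by_cases h3z : a.count 3 = 0
              · have h3m : (3:Int) ∉ a := List.count_eq_zero.mp h3z
                simp [hif4, hr2, hd2ct5, h5, hd2ct3, h3m, hd2c3, hd2g', hnotrem, h3z] <;> omega
              · have h3m : (3:Int) ∈ a := List.count_pos_iff.mp (by omega)
                simp [hif4, hr2, hd2ct5, h5, hd2ct3, h3m, hd2c3, hd2g', hnotrem, h3z,
                  show ¬ (((a.count 3 : Nat) : Int) ≤ 0) by omega]
            · simp [hif4, hr2, hd2ct5, h5, hnotrem]
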